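-- pv_equiv track=rewrite | github.com/djbMacDonald/prometheus | bots/mock.py | _mockString
-- ===== SOURCE A (Python) =====
-- def _mockString(str):
--   ret = ""
--   i = True  # capitalize
--   for char in str:
--       if i:
--           ret += char.upper()
--       else:
--           ret += char.lower()
--       if char != ' ':
--           i = not i
--   return ret
-- ===== SOURCE B (Python) =====
-- def _mockString(str):
--   chars = [c for c in str if c != ' ']
--   cased = [c.upper() if i % 2 == 0 else c.lower() for i, c in enumerate(chars)]
--   it = iter(cased)
--   return ''.join(next(it) if c != ' ' else ' ' for c in str)
-- ===== Notes on version B (the rewrite author's own statement) =====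
-- stated objective: alternative
-- what changed: Replaces the single fused loop with a boolean toggle by a filter/case-by-index/weave pipeline: first extract the non-space characters, case them by their position parity in that filtered list, then weave them back between the literal spaces of the original string.
import Mathlib
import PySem

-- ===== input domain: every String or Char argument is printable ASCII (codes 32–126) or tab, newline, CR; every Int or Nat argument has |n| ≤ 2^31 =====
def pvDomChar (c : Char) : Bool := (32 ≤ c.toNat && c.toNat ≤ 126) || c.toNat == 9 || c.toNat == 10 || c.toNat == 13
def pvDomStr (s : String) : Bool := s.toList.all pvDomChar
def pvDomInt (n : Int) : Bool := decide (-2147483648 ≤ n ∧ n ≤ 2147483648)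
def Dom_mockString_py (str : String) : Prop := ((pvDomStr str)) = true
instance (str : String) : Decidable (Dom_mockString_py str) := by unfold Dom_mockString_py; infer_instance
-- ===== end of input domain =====

-- B replaces A's fused toggle loop with a filter / case-by-index / weave pipeline (objective: alternative).

-- ===== PORT A =====
-- one pass, accumulator (ret as List Char, toggle i), exactly A's loop
def mockString_py (str : String) : String :=
  let r := str.toList.foldl
    (fun (st : List Char × Bool) char =>
      let ret := st.1 ++ [if st.2 then PySem.Chars.upperChar char else PySem.Chars.lowerChar char]
      let i := if char ≠ ' ' then !st.2 else st.2
      (ret, i))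
    ([], true)
  String.mk r.1

-- ===== PORT B =====
-- weave: walk the original string, pulling the next cased char for non-spaces (= the iterator in Source B)
def mockWeave (s : List Char) (cs : List Char) : List Char :=
  match s, cs with
  | [], _ => []
  | c :: s', cs =>
    if c = ' ' then ' ' :: mockWeave s' cs
    else match cs with
      | [] => []        -- iterator exhausted (unreachable: |cs| = number of non-spaces)
      | d :: ds => d :: mockWeave s' ds

def mockString_py_alt (str : String) : String :=
  let chars := str.toList.filter (fun c => c ≠ ' ')
  let cased := (PySem.List.enumerate chars).map
    (fun ic => if ic.1 % 2 == 0 then PySem.Chars.upperChar ic.2 else PySem.Chars.lowerChar ic.2)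
  String.mk (mockWeave str.toList cased)

-- ===== PRECONDITION & SPEC =====
def Spec_mockString_py (str : String) (out : String) : Prop := out = mockString_py_alt str
instance (str : String) (out : String) : Decidable (Spec_mockString_py str out) := by unfold Spec_mockString_py; infer_instance

-- ===== CLAIM (what is proved, stated in full; the proofs are below) =====
def Claim_equal_mockString_py : Prop := ∀ (str : String), Dom_mockString_py str → Spec_mockString_py str (mockString_py str)

-- ===== LEMMAS AND PROOFS =====

-- reference recursion: what A's loop computes from toggle b onward
def mockGo (s : List Char) (b : Bool) : List Char :=
  match s with
  | [] => []
  | c :: s' =>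
    (if b then PySem.Chars.upperChar c else PySem.Chars.lowerChar c) ::
      mockGo s' (if c ≠ ' ' then !b else b)

theorem mockA_foldl (s : List Char) (acc : List Char) (b : Bool) :
    s.foldl
      (fun (st : List Char × Bool) char =>
        let ret := st.1 ++ [if st.2 then PySem.Chars.upperChar char else PySem.Chars.lowerChar char]
        let i := if char ≠ ' ' then !st.2 else st.2
        (ret, i))
      (acc, b)
    = ((acc ++ mockGo s b,
        s.foldl (fun b char => if char ≠ ' ' then !b else b) b) : List Char × Bool) := by
  induction s generalizing acc b with
  | nil => simp [mockGo]
  | cons c s ih =>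
    rw [List.foldl_cons]
    refine (ih _ _).trans ?_
    simp [mockGo]

-- casing by parity, starting with b
def mockCase (cs : List Char) (b : Bool) : List Char :=
  match cs with
  | [] => []
  | c :: cs' =>
    (if b then PySem.Chars.upperChar c else PySem.Chars.lowerChar c) :: mockCase cs' (!b)

theorem mockCase_enumerate (cs : List Char) (n : Nat) :
    (PySem.List.enumerate cs (n : Int)).map
      (fun ic => if ic.1 % 2 == 0 then PySem.Chars.upperChar ic.2 else PySem.Chars.lowerChar ic.2)
    = mockCase cs (n % 2 == 0) := by
  induction cs generalizing n with
  | nil => simp [PySem.List.enumerate_nil, mockCase]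
  | cons c cs ih =>
    rw [PySem.List.enumerate_cons, List.map_cons]
    have h1 : (n : Int) + 1 = ((n + 1 : Nat) : Int) := by push_cast; ring
    rw [h1, ih]
    have h3 : (((n : Int) % 2 == 0) : Bool) = (n % 2 == 0) := by
      rcases Nat.mod_two_eq_zero_or_one n with h | h
      · have e : (n : Int) % 2 = 0 := by omega
        simp [e, h]
      · have e : (n : Int) % 2 = 1 := by omega
        simp [e, h]
    have h2 : (((n + 1) % 2 == 0) : Bool) = !(n % 2 == 0) := by
      rcases Nat.mod_two_eq_zero_or_one n with h | h <;> simp [Nat.add_mod, h]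
    rw [mockCase, h2, h3]

theorem mockWeave_case (s : List Char) (b : Bool) :
    mockWeave s (mockCase (s.filter (fun c => c ≠ ' ')) b) = mockGo s b := by
  induction s generalizing b with
  | nil => simp [mockWeave, mockGo]
  | cons c s ih =>
    have hu : PySem.Chars.upperChar ' ' = ' ' := by decide
    have hl : PySem.Chars.lowerChar ' ' = ' ' := by decide
    by_cases hc : c = ' '
    · subst hc
      cases b <;> simp [mockWeave, mockGo, hu, hl] <;> simpa using ih _
    · simp [mockWeave, mockGo, mockCase, hc]
      simpa using ih (!b)

-- ===== VERDICT (by name: the statement is the Claim_ definition above) =====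
theorem mockString_py_spec : Claim_equal_mockString_py := by
  intro str _
  unfold Spec_mockString_py mockString_py mockString_py_alt
  show String.mk (str.toList.foldl
      (fun (st : List Char × Bool) char =>
        let ret := st.1 ++ [if st.2 then PySem.Chars.upperChar char else PySem.Chars.lowerChar char]
        let i := if char ≠ ' ' then !st.2 else st.2
        (ret, i))
      ([], true)).1
    = String.mk (mockWeave str.toList
        ((PySem.List.enumerate (str.toList.filter (fun c => c ≠ ' '))).map
          (fun ic => if ic.1 % 2 == 0 then PySem.Chars.upperChar ic.2 else PySem.Chars.lowerChar ic.2)))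
  rw [mockA_foldl]
  have he := mockCase_enumerate (str.toList.filter (fun c => c ≠ ' ')) 0
  rw [Nat.cast_zero] at he
  rw [he, show (((0 : Nat) % 2 == 0) : Bool) = true from rfl, mockWeave_case]
  rfl
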